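-- pv_equiv track=rewrite | github.com/OlaszPL/Algorithms_and_data_structures_course | Part 3 - dynamiki etc/Cw2/zad2.py | bricks
-- ===== SOURCE A (Python) =====
-- def bricks(a):
--     n = len(a)
--     F = [0] * n
--
--     for i in range(n):
--         F[i] = 1 # bazowo
--         for j in range(i):
--             F[i] = max(F[i], F[j] + 1 if a[i][0] >= a[j][0] and a[i][1] <= a[j][1] else 0)
--
--     return n - max(F) # bo nie ma gwarancji, że F[n - 1] jest największe
-- ===== SOURCE B (Python) =====
-- def bricks(a):
--     # Layer-peeling (Mirsky decomposition): repeatedly strip elements with no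
--     # qualifying predecessor; the number of rounds equals the longest chain.
--     n = len(a)
--     rem = list(enumerate(a))
--     layers = 0
--     while rem:
--         layers += 1
--         rem = [(i, x) for (i, x) in rem
--                if any(j < i and x[0] >= y[0] and x[1] <= y[1] for (j, y) in rem)]
--     return n - layers
-- ===== Notes on version B (the rewrite author's own statement) =====
-- stated objective: alternative
-- what changed: Replaces the quadratic DP table (longest chain length ending at each index) by Mirsky-style layer peeling: repeatedly remove the elements that have no qualifying predecessor among the remaining ones; the number of peeling rounds equals the longest chain length.
import Mathlib
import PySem

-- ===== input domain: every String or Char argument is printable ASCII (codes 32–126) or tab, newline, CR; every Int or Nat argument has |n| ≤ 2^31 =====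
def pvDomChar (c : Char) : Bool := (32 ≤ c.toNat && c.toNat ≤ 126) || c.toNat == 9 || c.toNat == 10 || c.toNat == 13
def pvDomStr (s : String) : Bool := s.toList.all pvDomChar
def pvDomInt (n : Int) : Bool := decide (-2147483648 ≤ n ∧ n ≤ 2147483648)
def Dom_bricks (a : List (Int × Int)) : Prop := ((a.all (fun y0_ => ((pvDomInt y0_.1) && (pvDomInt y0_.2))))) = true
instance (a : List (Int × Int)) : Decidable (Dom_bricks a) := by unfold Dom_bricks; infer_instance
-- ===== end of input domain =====

-- B replaces A's quadratic DP table (longest chain ending at each index) by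
-- Mirsky-style layer peeling, a genuinely different algorithm; A raises
-- ValueError on the empty list, which Pre_ excludes (B returns 0 there).


-- ===== PORT A =====
-- literal transliteration of A: F = [0]*n; nested for-loops updating F[i].
-- a.getD / F.getD are exact here because every index the loops use is in range;
-- max(F) on the empty F would raise in Python — excluded by Pre_bricks.
def bricks (a : List (Int × Int)) : Int :=
  let n := a.length
  let F0 : List Int := List.replicate n 0
  let F := (List.range n).foldl (fun F i =>
      let F1 := F.set i 1
      (List.range i).foldl (fun F j =>
        F.set i (max (F.getD i 0)
          (if (a.getD i (0,0)).1 ≥ (a.getD j (0,0)).1 ∧ (a.getD i (0,0)).2 ≤ (a.getD j (0,0)).2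
           then F.getD j 0 + 1 else 0))) F1) F0
  (n : Int) - (PySem.List.max? F (fun x => x)).getD 0

-- ===== PORT B =====
-- Source B's while loop: one recursive call per peeling round.
def bricksPeel (rem : List (Int × (Int × Int))) (layers : Int) : Int :=
  if hrem : rem = [] then layers
  else
    bricksPeel (rem.filter (fun p =>
      rem.any (fun q => decide (q.1 < p.1) && decide (p.2.1 ≥ q.2.1) && decide (p.2.2 ≤ q.2.2))))
      (layers + 1)
termination_by rem.length
decreasing_by
  obtain ⟨p, hp⟩ : ∃ p, p ∈ rem.argmin Prod.fst := by
    cases h : rem.argmin Prod.fst with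
    | none => exact absurd (List.argmin_eq_none.mp h) hrem
    | some p => exact ⟨p, by simp⟩
  -- the element with the least index has no predecessor in rem, so it is removed
  have key : ∀ P : Int × Int × Int → Bool, (∃ x ∈ rem, ¬ P x = true) →
      (List.filter (fun x : {y // y ∈ rem} => P x.val) rem.attach).unattach.length < rem.length := by
    intro P hP
    simp only [List.unattach_filter, List.unattach_attach,
      List.length_filter_lt_length_iff_exists]
    exact hP
  refine key (fun y => rem.any fun q =>
      decide (q.1 < y.1) && decide (y.2.1 ≥ q.2.1) && decide (y.2.2 ≤ q.2.2)) ⟨p, List.argmin_mem hp, ?_⟩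
  simp only [List.any_eq_true, Bool.and_eq_true, decide_eq_true_eq, not_exists, not_and]
  intro q hq h1
  exact absurd h1.1 (not_lt.mpr (List.le_of_mem_argmin hq hp))

def bricks_alt (a : List (Int × Int)) : Int :=
  (a.length : Int) - bricksPeel (PySem.List.enumerate a) 0

-- ===== PRECONDITION & SPEC =====
-- Pre_ excludes only the empty list, on which A's max(F) raises ValueError.
def Pre_bricks (a : List (Int × Int)) : Prop := a ≠ []
instance (a : List (Int × Int)) : Decidable (Pre_bricks a) := by unfold Pre_bricks; infer_instance
def pvWitness_bricks : (List (Int × Int)) := [(1, 2), (2, 1), (0, 5)]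


def Spec_bricks (a : List (Int × Int)) (out : Int) : Prop := out = bricks_alt a
instance (a : List (Int × Int)) (out : Int) : Decidable (Spec_bricks a out) := by unfold Spec_bricks; infer_instance

-- ===== CLAIM (what is proved, stated in full; the proofs are below) =====
def Claim_equal_bricks : Prop := ∀ (a : List (Int × Int)), Dom_bricks a → Pre_bricks a → Spec_bricks a (bricks a)

-- ===== LEMMAS AND PROOFS =====

-- the DP value table: pvGtab a i lists, in order, the longest-chain-ending-at-j
-- value for j < i;  pvG a i is that value read from the full table.
def pvGetA (a : List (Int × Int)) (i : Nat) : Int × Int := a.getD i (0, 0)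

abbrev pvCond (a : List (Int × Int)) (j i : Nat) : Prop :=
  (pvGetA a i).1 ≥ (pvGetA a j).1 ∧ (pvGetA a i).2 ≤ (pvGetA a j).2

def pvGtab (a : List (Int × Int)) : Nat → List Int
  | 0 => []
  | i + 1 => pvGtab a i ++
      [1 + (List.range i).foldl
        (fun m j => max m (if pvCond a j i then (pvGtab a i).getD j 0 else 0)) 0]

def pvG (a : List (Int × Int)) (i : Nat) : Int := (pvGtab a a.length).getD i 0

def pvMax (a : List (Int × Int)) : Int :=
  match pvGtab a a.length with
  | [] => 0
  | x :: t => t.foldl max x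

def pvS (a : List (Int × Int)) (k : Nat) : List (Int × (Int × Int)) :=
  (PySem.List.enumerate a).filter (fun p => decide ((k : Int) < pvG a p.1.toNat))

theorem pvGtab_length (a : List (Int × Int)) (i : Nat) : (pvGtab a i).length = i := by
  induction i with
  | zero => rfl
  | succ i ih => simp [pvGtab, ih]

theorem pvGtab_getD (a : List (Int × Int)) {j i k : Nat} (h1 : j < i) (h2 : i ≤ k) :
    (pvGtab a k).getD j 0 = (pvGtab a i).getD j 0 := by
  induction k with
  | zero => omega
  | succ k ih =>
    rcases Nat.lt_or_ge i (k + 1) with hik | hik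
    · rw [← ih (by omega)]
      show (pvGtab a k ++ _).getD j 0 = _
      rw [List.getD_append]
      rw [pvGtab_length]; omega
    · have : i = k + 1 := by omega
      subst this; rfl

theorem pvG_rec (a : List (Int × Int)) {i : Nat} (h : i < a.length) :
    pvG a i = 1 + (List.range i).foldl
      (fun m j => max m (if pvCond a j i then pvG a j else 0)) 0 := by
  show (pvGtab a a.length).getD i 0 = _
  rw [pvGtab_getD a (Nat.lt_succ_self i) h]
  show (pvGtab a i ++ [_]).getD i 0 = _
  rw [List.getD_append_right _ _ _ _ (by rw [pvGtab_length])]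
  simp only [pvGtab_length, Nat.sub_self, List.getD_cons_zero]
  congr 1
  apply PySem.List.foldl_congr_mem
  intro m j hj
  congr 1
  split
  · rw [pvG, pvGtab_getD a (List.mem_range.mp hj) (Nat.le_of_lt h)]
  · rfl

theorem pvG_pos (a : List (Int × Int)) {i : Nat} (h : i < a.length) : 1 ≤ pvG a i := by
  rw [pvG_rec a h]
  have := (PySem.List.le_foldl_max_int (List.range i)
    (fun j => if pvCond a j i then pvG a j else 0) 0).1
  omega

theorem pvG_chain (a : List (Int × Int)) {j i : Nat} (hj : j < i) (hi : i < a.length)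
    (hc : pvCond a j i) : pvG a j + 1 ≤ pvG a i := by
  rw [pvG_rec a hi]
  have := (PySem.List.le_foldl_max_int (List.range i)
    (fun j => if pvCond a j i then pvG a j else 0) 0).2 j (List.mem_range.mpr hj)
  rw [if_pos hc] at this
  omega

theorem pv_foldl_max_le {α : Type} (xs : List α) (f : α → Int) (init c : Int)
    (h0 : init ≤ c) (h : ∀ x ∈ xs, f x ≤ c) :
    xs.foldl (fun acc y => max acc (f y)) init ≤ c := by
  induction xs generalizing init with
  | nil => exact h0
  | cons x t ih =>
    exact ih (max init (f x)) (max_le h0 (h x List.mem_cons_self)) fun y hy => h y (List.mem_cons_of_mem _ hy)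

theorem pvG_succ_exists (a : List (Int × Int)) {i : Nat} (hi : i < a.length) (k : Nat)
    (h : (k : Int) + 2 ≤ pvG a i) :
    ∃ j, j < i ∧ pvCond a j i ∧ (k : Int) + 1 ≤ pvG a j := by
  by_contra hcon
  push_neg at hcon
  rw [pvG_rec a hi] at h
  have hb : (List.range i).foldl
      (fun m j => max m (if pvCond a j i then pvG a j else 0)) 0 ≤ (k : Int) := by
    apply pv_foldl_max_le _ _ _ _ (by positivity)
    intro j hj
    split
    · next hc => have := hcon j (List.mem_range.mp hj) hc; omega
    · positivity
  omega

theorem pvMax_spec (a : List (Int × Int)) (h : a ≠ []) :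
    (∃ i, i < a.length ∧ pvG a i = pvMax a) ∧ (∀ i, i < a.length → pvG a i ≤ pvMax a) := by
  have hlen : (pvGtab a a.length).length = a.length := pvGtab_length a a.length
  obtain ⟨x, t, hxt⟩ : ∃ x t, pvGtab a a.length = x :: t := by
    cases hg : pvGtab a a.length with
    | nil => rw [hg] at hlen; exact absurd (List.length_eq_zero_iff.mp hlen.symm) h
    | cons x t => exact ⟨x, t, rfl⟩
  have hmax : pvMax a = t.foldl max x := by rw [pvMax, hxt]
  constructor
  · have hmem : pvMax a ∈ pvGtab a a.length := by
      rw [hxt, hmax]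
      rcases PySem.List.foldl_max_mem t x with h1 | h1
      · rw [h1]; exact List.mem_cons_self
      · exact List.mem_cons_of_mem _ h1
    obtain ⟨idx, hidx, hval⟩ := List.mem_iff_getElem.mp hmem
    rw [hlen] at hidx
    exact ⟨idx, hidx, by rw [pvG, List.getD_eq_getElem _ _ (by omega), hval]⟩
  · intro i hi
    have hmem : pvG a i ∈ pvGtab a a.length := by
      rw [pvG, List.getD_eq_getElem _ _ (by omega)]
      exact List.getElem_mem _
    rw [hxt] at hmem
    rw [hmax]
    rcases List.mem_cons.mp hmem with h1 | h1
    · rw [h1]; exact (PySem.List.le_foldl_max t x).1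
    · exact (PySem.List.le_foldl_max t x).2 _ h1

-- ===== A side =====
theorem pv_set_mid (L R : List Int) (v x : Int) : (L ++ v :: R).set L.length x = L ++ x :: R := by
  induction L with
  | nil => rfl
  | cons y L ih => simp [List.set_cons_succ, ih]

theorem pv_getD_mid (L R : List Int) (v : Int) : (L ++ v :: R).getD L.length 0 = v := by
  rw [List.getD_append_right _ _ _ _ (Nat.le_refl _)]
  simp

theorem pvGtab_succ (a : List (Int × Int)) {i : Nat} (h : i < a.length) :
    pvGtab a (i + 1) = pvGtab a i ++ [pvG a i] := by
  show pvGtab a i ++ [1 + (List.range i).foldl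
      (fun m j => max m (if pvCond a j i then (pvGtab a i).getD j 0 else 0)) 0] = _
  congr 2
  rw [pvG_rec a h]
  congr 1
  apply PySem.List.foldl_congr_mem
  intro m j hj
  congr 2
  rw [pvG, pvGtab_getD a (List.mem_range.mp hj) (Nat.le_of_lt h)]

theorem pv_inner (a : List (Int × Int)) (i : Nat) (js : List Nat) (L R : List Int)
    (hL : L.length = i) (hjs : ∀ j ∈ js, j < i) (v : Int) :
    js.foldl (fun F j =>
        F.set i (max (F.getD i 0)
          (if (a.getD i (0,0)).1 ≥ (a.getD j (0,0)).1 ∧ (a.getD i (0,0)).2 ≤ (a.getD j (0,0)).2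
           then F.getD j 0 + 1 else 0))) (L ++ v :: R)
      = L ++ (js.foldl (fun m j =>
          max m (if (a.getD i (0,0)).1 ≥ (a.getD j (0,0)).1 ∧ (a.getD i (0,0)).2 ≤ (a.getD j (0,0)).2
             then L.getD j 0 + 1 else 0)) v) :: R := by
  induction js generalizing v with
  | nil => rfl
  | cons j js ih =>
    have hj : j < i := hjs j List.mem_cons_self
    simp only [List.foldl_cons]
    rw [← hL, pv_getD_mid, List.getD_append _ _ _ j (by omega), pv_set_mid, hL]
    exact ih (fun x hx => hjs x (List.mem_cons_of_mem _ hx)) _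

theorem pv_shift (js : List Nat) (c : Nat → Prop) [DecidablePred c] (t : Nat → Int) :
    ∀ acc : Int, 1 ≤ acc →
      js.foldl (fun m j => max m (if c j then t j + 1 else 0)) acc
        = 1 + js.foldl (fun m j => max m (if c j then t j else 0)) (acc - 1) := by
  induction js with
  | nil => intro acc h; simp only [List.foldl_nil]; omega
  | cons j js ih =>
    intro acc h
    simp only [List.foldl_cons]
    rw [ih _ (le_trans h (le_max_left _ _))]
    congr 2
    simp only [max_def]
    split_ifs <;> omega

theorem pv_outer (a : List (Int × Int)) :
    ∀ i, i ≤ a.length →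
      (List.range i).foldl (fun F i =>
        let F1 := F.set i 1
        (List.range i).foldl (fun F j =>
          F.set i (max (F.getD i 0)
            (if (a.getD i (0,0)).1 ≥ (a.getD j (0,0)).1 ∧ (a.getD i (0,0)).2 ≤ (a.getD j (0,0)).2
             then F.getD j 0 + 1 else 0))) F1) (List.replicate a.length 0)
      = pvGtab a i ++ List.replicate (a.length - i) 0 := by
  intro i
  induction i with
  | zero => intro _; simp [pvGtab]
  | succ i ih =>
    intro hi
    rw [List.range_succ, List.foldl_append, ih (by omega)]
    simp only [List.foldl_cons, List.foldl_nil]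
    have hrep : a.length - i = (a.length - (i + 1)) + 1 := by omega
    rw [hrep, List.replicate_succ]
    have hlen : (pvGtab a i).length = i := pvGtab_length a i
    have hset := pv_set_mid (pvGtab a i) (List.replicate (a.length - (i + 1)) 0) 0 1
    rw [hlen] at hset
    rw [hset]
    rw [pv_inner a i (List.range i) (pvGtab a i) (List.replicate (a.length - (i + 1)) 0) hlen
      (fun j hj => List.mem_range.mp hj) 1]
    have hcongr : (List.range i).foldl (fun m j =>
          max m (if (a.getD i (0,0)).1 ≥ (a.getD j (0,0)).1 ∧ (a.getD i (0,0)).2 ≤ (a.getD j (0,0)).2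
             then (pvGtab a i).getD j 0 + 1 else 0)) 1
        = (List.range i).foldl (fun m j =>
          max m (if pvCond a j i then pvG a j + 1 else 0)) 1 := by
      apply PySem.List.foldl_congr_mem
      intro m j hj
      have : (pvGtab a i).getD j 0 = pvG a j := by
        rw [pvG]; exact (pvGtab_getD a (List.mem_range.mp hj) (by omega)).symm
      rw [this]
      simp only [pvCond, pvGetA]
      exact congrArg (max m) (if_congr Iff.rfl rfl rfl)
    rw [hcongr, pv_shift (List.range i) (fun j => pvCond a j i) (pvG a) 1 le_rfl]
    norm_num
    rw [← pvG_rec a (by omega), pvGtab_succ a (by omega)]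
    simp

theorem bricks_eq (a : List (Int × Int)) (h : a ≠ []) :
    bricks a = (a.length : Int) - pvMax a := by
  unfold bricks
  dsimp only
  rw [pv_outer a a.length le_rfl]
  simp only [Nat.sub_self, List.replicate_zero, List.append_nil]
  obtain ⟨x, t, hxt⟩ : ∃ x t, pvGtab a a.length = x :: t := by
    cases hg : pvGtab a a.length with
    | nil =>
      have := pvGtab_length a a.length
      rw [hg] at this
      exact absurd (List.length_eq_zero_iff.mp this.symm) h
    | cons x t => exact ⟨x, t, rfl⟩
  rw [hxt, PySem.List.max?_id_cons, pvMax, hxt]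
  rfl

-- ===== B side =====
theorem pv_mem_enum (a : List (Int × Int)) {p : Int × (Int × Int)}
    (hp : p ∈ PySem.List.enumerate a) :
    p.1 = (p.1.toNat : Int) ∧ p.1.toNat < a.length ∧ p.2 = pvGetA a p.1.toNat := by
  obtain ⟨m, hm, hpe⟩ := (PySem.List.mem_enumerate_iff _ _ _).mp hp
  subst hpe
  refine ⟨by simp, by simp [hm], ?_⟩
  simp only [Int.zero_add, Int.toNat_natCast]
  rw [pvGetA, List.getD_eq_getElem _ _ hm]

theorem pv_enum_mem (a : List (Int × Int)) {j : Nat} (hj : j < a.length) :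
    ((j : Int), pvGetA a j) ∈ PySem.List.enumerate a := by
  refine (PySem.List.mem_enumerate_iff _ _ _).mpr ⟨j, hj, ?_⟩
  rw [pvGetA, List.getD_eq_getElem _ _ hj]
  simp

theorem pv_any_iff (a : List (Int × Int)) (k : Nat) {p : Int × (Int × Int)}
    (hp : p ∈ PySem.List.enumerate a) (hk : (k : Int) < pvG a p.1.toNat) :
    ((pvS a k).any
        (fun q => decide (q.1 < p.1) && decide (p.2.1 ≥ q.2.1) && decide (p.2.2 ≤ q.2.2)))
      = decide ((k : Int) + 1 < pvG a p.1.toNat) := by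
  obtain ⟨hp1, hp2, hp3⟩ := pv_mem_enum a hp
  by_cases hgt : (k : Int) + 1 < pvG a p.1.toNat
  · rw [decide_eq_true hgt, List.any_eq_true]
    obtain ⟨j, hji, hjc, hjg⟩ := pvG_succ_exists a hp2 k (by omega)
    refine ⟨((j : Int), pvGetA a j), List.mem_filter.mpr ⟨pv_enum_mem a (by omega), ?_⟩, ?_⟩
    · simp only [Int.toNat_natCast]
      exact decide_eq_true (by omega)
    · simp only [Bool.and_eq_true, decide_eq_true_eq]
      refine ⟨⟨?_, ?_⟩, ?_⟩
      · rw [hp1]; exact_mod_cast hji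
      · rw [hp3]; exact hjc.1
      · rw [hp3]; exact hjc.2
  · rw [decide_eq_false hgt, List.any_eq_false]
    intro q hq
    simp only [Bool.and_eq_true, decide_eq_true_eq, not_and]
    intro hqlt hle
    obtain ⟨hqS, hqk⟩ := List.mem_filter.mp hq
    obtain ⟨hq1, hq2, hq3⟩ := pv_mem_enum a hqS
    have hij : q.1.toNat < p.1.toNat := by have h1 := hqlt.1; omega
    have hc : pvCond a q.1.toNat p.1.toNat := by
      rw [pvCond, ← hp3, ← hq3]; exact ⟨hqlt.2, hle⟩
    have := pvG_chain a hij hp2 hc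
    have hqg : (k : Int) < pvG a q.1.toNat := of_decide_eq_true hqk
    omega

theorem pvS_step (a : List (Int × Int)) (k : Nat) :
    (pvS a k).filter (fun p => (pvS a k).any
        (fun q => decide (q.1 < p.1) && decide (p.2.1 ≥ q.2.1) && decide (p.2.2 ≤ q.2.2)))
      = pvS a (k + 1) := by
  conv_lhs => rw [pvS]
  rw [List.filter_filter, pvS]
  apply List.filter_congr
  intro p hp
  by_cases hk : (k : Int) < pvG a p.1.toNat
  · rw [decide_eq_true hk, Bool.and_true,
      show (List.filter (fun p => decide ((k : Int) < pvG a p.1.toNat)) (PySem.List.enumerate a))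
        = pvS a k from rfl,
      pv_any_iff a k hp hk,
      show ((k + 1 : Nat) : Int) = (k : Int) + 1 from by push_cast; ring]
  · rw [decide_eq_false hk, Bool.and_false]
    symm
    apply decide_eq_false
    push_cast
    omega

theorem pvPeel_S (a : List (Int × Int)) (d : Nat) :
    ∀ (k : Nat) (c : Int), (k : Int) + (d : Int) = pvMax a → a ≠ [] →
      bricksPeel (pvS a k) c = c + d := by
  induction d with
  | zero =>
    intro k c hkd h
    have hS : pvS a k = [] := by
      rw [pvS]
      apply List.filter_eq_nil_iff.mpr
      intro p hp
      obtain ⟨hp1, hp2, _⟩ := pv_mem_enum a hp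
      have := (pvMax_spec a h).2 p.1.toNat hp2
      simp only [decide_eq_true_eq]
      omega
    rw [hS, bricksPeel]
    simp
  | succ d ih =>
    intro k c hkd h
    obtain ⟨i, hi, hgi⟩ := (pvMax_spec a h).1
    have hmem : ((i : Int), pvGetA a i) ∈ pvS a k := by
      rw [pvS]
      refine List.mem_filter.mpr ⟨pv_enum_mem a hi, ?_⟩
      simp only [Int.toNat_natCast, decide_eq_true_eq]
      push_cast at hkd
      omega
    have hne : pvS a k ≠ [] := List.ne_nil_of_mem hmem
    rw [bricksPeel, dif_neg hne, pvS_step]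
    have := ih (k + 1) (c + 1) (by push_cast; push_cast at hkd; omega) h
    rw [this]
    push_cast
    ring

theorem bricks_alt_eq (a : List (Int × Int)) (h : a ≠ []) :
    bricks_alt a = (a.length : Int) - pvMax a := by
  have hmax1 : 1 ≤ pvMax a := by
    obtain ⟨i, hi, hgi⟩ := (pvMax_spec a h).1
    have := pvG_pos a hi
    omega
  have hS0 : PySem.List.enumerate a = pvS a 0 := by
    rw [pvS]
    symm
    apply List.filter_eq_self.mpr
    intro p hp
    obtain ⟨_, hp2, _⟩ := pv_mem_enum a hp
    have := pvG_pos a hp2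
    simp only [decide_eq_true_eq]
    omega
  rw [bricks_alt, hS0, pvPeel_S a (pvMax a).toNat 0 0 (by omega) h]
  omega

-- ===== VERDICT (by name: the statement is the Claim_ definition above) =====
theorem bricks_spec : Claim_equal_bricks := by
  intro a _ hpre
  unfold Spec_bricks
  rw [bricks_eq a hpre, bricks_alt_eq a hpre]
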